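-- pv_equiv track=rewrite | github.com/sgags-official/Envisage | src/generate_index.py | title_from_md
-- ===== SOURCE A (Python) =====
-- def title_from_md(mdtext: str) -> str:
--     for line in mdtext.splitlines():
--         l = line.strip()
--         if l.startswith("# "):
--             return l[2:].strip()
--     # fallback first non-empty
--     for line in mdtext.splitlines():
--         if line.strip():
--             return line.strip()[:80]
--     return "Untitled"
-- ===== SOURCE B (Python) =====
-- def title_from_md(mdtext: str) -> str:
--     first_nonempty = None
--     for line in mdtext.splitlines():
--         stripped = line.strip()
--         if stripped.startswith("# "):
--             return stripped[2:].strip()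
--         if first_nonempty is None and stripped:
--             first_nonempty = stripped
--     return first_nonempty[:80] if first_nonempty is not None else "Untitled"
-- ===== Notes on version B (the rewrite author's own statement) =====
-- stated objective: simpler
-- what changed: Single pass over splitlines carrying the first non-empty stripped line as state, instead of two separate scans (one for a heading, one for the fallback).
import Mathlib
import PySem

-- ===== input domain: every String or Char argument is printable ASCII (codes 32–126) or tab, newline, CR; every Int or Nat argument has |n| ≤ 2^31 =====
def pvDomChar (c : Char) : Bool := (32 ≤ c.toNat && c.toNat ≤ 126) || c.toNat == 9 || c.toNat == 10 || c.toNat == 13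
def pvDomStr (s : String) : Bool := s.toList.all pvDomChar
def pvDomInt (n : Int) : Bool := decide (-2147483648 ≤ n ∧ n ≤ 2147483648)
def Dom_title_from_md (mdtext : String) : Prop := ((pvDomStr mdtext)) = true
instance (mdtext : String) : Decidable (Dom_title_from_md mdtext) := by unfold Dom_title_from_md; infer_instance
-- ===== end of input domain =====

-- B changes the decomposition only: one pass with carried fallback state instead of A's two scans; same results.
-- ===== PORT A =====
def pvA1 : List String → Option String
  | [] => none
  | line :: rest =>
    let l := PySem.Str.strip line
    if PySem.Str.startswith l "# " then some (PySem.Str.strip (PySem.Str.slice l (some 2) none))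
    else pvA1 rest

def pvA2 : List String → Option String
  | [] => none
  | line :: rest =>
    if PySem.Str.strip line ≠ "" then some (PySem.Str.slice (PySem.Str.strip line) none (some 80))
    else pvA2 rest

def title_from_md (mdtext : String) : String :=
  match pvA1 (PySem.Str.splitlines mdtext) with
  | some t => t
  | none =>
    match pvA2 (PySem.Str.splitlines mdtext) with
    | some t => t
    | none => "Untitled"

-- ===== PORT B =====
def pvBgo : List String → Option String → String
  | [], acc =>
    match acc with
    | some f => PySem.Str.slice f none (some 80)
    | none => "Untitled"
  | line :: rest, acc =>
    let stripped := PySem.Str.strip line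
    if PySem.Str.startswith stripped "# " then PySem.Str.strip (PySem.Str.slice stripped (some 2) none)
    else pvBgo rest (match acc with
      | none => if stripped ≠ "" then some stripped else none
      | some f => some f)

def title_from_md_alt (mdtext : String) : String := pvBgo (PySem.Str.splitlines mdtext) none

-- ===== PRECONDITION & SPEC =====
def Spec_title_from_md (mdtext : String) (out : String) : Prop := out = title_from_md_alt mdtext
instance (mdtext : String) (out : String) : Decidable (Spec_title_from_md mdtext out) := by unfold Spec_title_from_md; infer_instance

-- ===== CLAIM =====
def Claim_equal_title_from_md : Prop := ∀ (mdtext : String), Dom_title_from_md mdtext → Spec_title_from_md mdtext (title_from_md mdtext)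

-- ===== LEMMAS AND PROOFS =====
theorem pvBgo_eq (lines : List String) : ∀ acc : Option String,
    pvBgo lines acc =
      ((pvA1 lines).getD (match acc with
        | some f => PySem.Str.slice f none (some 80)
        | none => (pvA2 lines).getD "Untitled")) := by
  induction lines with
  | nil => intro acc; cases acc <;> simp [pvBgo, pvA1, pvA2]
  | cons line rest ih =>
    intro acc
    cases acc with
    | some f =>
      simp only [pvBgo, pvA1]
      split_ifs with h
      · simp
      · rw [ih]
    | none =>
      simp only [pvBgo, pvA1, pvA2]
      split_ifs with h hn <;> simp [ih]

-- ===== VERDICT =====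
theorem title_from_md_spec : Claim_equal_title_from_md := by
  intro mdtext _
  unfold Spec_title_from_md title_from_md title_from_md_alt
  rw [pvBgo_eq]
  cases h1 : pvA1 (PySem.Str.splitlines mdtext) <;>
    cases h2 : pvA2 (PySem.Str.splitlines mdtext) <;> simp
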